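-- pv_equiv track=rewrite | github.com/rahidz/oeis-offline-matcher | src/oeis_matcher/storage.py | _sign_pattern
-- ===== SOURCE A (Python) =====
-- def _sign_pattern(values: list[int]) -> str:
--     if not values:
--         return "empty"
--     all_nonneg = all(v >= 0 for v in values)
--     all_nonpos = all(v <= 0 for v in values)
--     if all_nonneg:
--         return "nonneg"
--     if all_nonpos:
--         return "nonpos"
--     # alternating sign?
--     alt = all(values[i] == 0 or values[i + 1] == 0 or (values[i] > 0) != (values[i + 1] > 0) for i in range(len(values) - 1))
--     if alt:
--         return "alternating"
--     return "mixed"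
-- ===== SOURCE B (Python) =====
-- def _sign_pattern(values: list[int]) -> str:
--     # Single pass with an accumulator: one fold computes has_neg, has_pos and
--     # the adjacent-pair alternation flag simultaneously, then classifies.
--     if not values:
--         return "empty"
--     prev = values[0]
--     has_neg, has_pos, alt_ok = prev < 0, prev > 0, True
--     for v in values[1:]:
--         alt_ok = alt_ok and (prev == 0 or v == 0 or (prev > 0) != (v > 0))
--         has_neg = has_neg or v < 0
--         has_pos = has_pos or v > 0
--         prev = v
--     if not has_neg:
--         return "nonneg"
--     if not has_pos:
--         return "nonpos"
--     return "alternating" if alt_ok else "mixed"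
-- ===== Notes on version B (the rewrite author's own statement) =====
-- stated objective: alternative
-- what changed: B makes a single pass over the list with an accumulator (has_neg, has_pos, alt_ok, prev), computing all three classification facts in one fused loop and classifying from the final state, instead of A's three/four separate staged generator scans with index arithmetic.
import Mathlib
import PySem

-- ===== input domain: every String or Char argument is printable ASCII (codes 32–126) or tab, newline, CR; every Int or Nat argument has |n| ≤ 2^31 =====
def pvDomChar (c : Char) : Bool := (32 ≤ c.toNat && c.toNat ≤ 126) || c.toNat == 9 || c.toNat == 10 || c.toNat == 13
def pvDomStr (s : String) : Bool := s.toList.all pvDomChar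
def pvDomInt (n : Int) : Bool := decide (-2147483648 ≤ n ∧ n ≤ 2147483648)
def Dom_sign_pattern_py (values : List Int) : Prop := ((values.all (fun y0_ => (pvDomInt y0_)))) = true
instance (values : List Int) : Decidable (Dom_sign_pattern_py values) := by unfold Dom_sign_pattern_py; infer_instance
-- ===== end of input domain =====

-- B fuses A's three/four staged scans into one single pass with an accumulator
-- (has_neg, has_pos, alt_ok, prev) and classifies from the final state; same cost.

-- ===== PORT A =====
-- indices i and i+1 from range(len(values)-1) are always in range, so pyGetD is exact here
def sign_pattern_py (values : List Int) : String :=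
  if values = [] then "empty"
  else
    let all_nonneg := values.all (fun v => decide (0 ≤ v))
    let all_nonpos := values.all (fun v => decide (v ≤ 0))
    if all_nonneg then "nonneg"
    else if all_nonpos then "nonpos"
    else
      let alt := (PySem.List.pyRange 0 ((values.length : Int) - 1) 1).all
        (fun i => (PySem.List.pyGetD values i 0 == 0) ||
                  (PySem.List.pyGetD values (i + 1) 0 == 0) ||
                  (decide (0 < PySem.List.pyGetD values i 0) != decide (0 < PySem.List.pyGetD values (i + 1) 0)))
      if alt then "alternating" else "mixed"

-- ===== PORT B =====
-- single-pass loop body: state = (has_neg, has_pos, alt_ok, prev)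
def pvStepB (s : Bool × Bool × Bool × Int) (v : Int) : Bool × Bool × Bool × Int :=
  (s.1 || decide (v < 0), s.2.1 || decide (0 < v),
   s.2.2.1 && ((s.2.2.2 == 0) || (v == 0) || (decide (0 < s.2.2.2) != decide (0 < v))), v)

def sign_pattern_py_alt (values : List Int) : String :=
  match values with
  | [] => "empty"
  | v0 :: rest =>
    let st := rest.foldl pvStepB (decide (v0 < 0), decide (0 < v0), true, v0)
    if !st.1 then "nonneg"
    else if !st.2.1 then "nonpos"
    else if st.2.2.1 then "alternating" else "mixed"

-- ===== PRECONDITION & SPEC =====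
def Spec_sign_pattern_py (values : List Int) (out : String) : Prop := out = sign_pattern_py_alt values
instance (values : List Int) (out : String) : Decidable (Spec_sign_pattern_py values out) := by unfold Spec_sign_pattern_py; infer_instance

-- ===== CLAIM (what is proved, stated in full; the proofs are below) =====
def Claim_equal_sign_pattern_py : Prop := ∀ (values : List Int), Dom_sign_pattern_py values → Spec_sign_pattern_py values (sign_pattern_py values)

-- ===== LEMMAS AND PROOFS =====

-- chained adjacent-pair alternation check, seeded with the previous element
def pvAltChain (prev : Int) : List Int → Bool
  | [] => true
  | v :: l => ((prev == 0) || (v == 0) || (decide (0 < prev) != decide (0 < v))) && pvAltChain v l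

-- the fold's invariant: each state component is characterized in closed form
theorem foldB_inv (l : List Int) (hn hp ok : Bool) (prev : Int) :
    l.foldl pvStepB (hn, hp, ok, prev) =
      (hn || l.any (fun v => decide (v < 0)),
       hp || l.any (fun v => decide (0 < v)),
       ok && pvAltChain prev l,
       l.getLastD prev) := by
  induction l generalizing hn hp ok prev with
  | nil => simp [pvAltChain]
  | cons v t ih =>
      simp only [List.foldl_cons, pvStepB, ih, List.any_cons, pvAltChain,
        List.getLastD_cons, Bool.or_assoc, Bool.and_assoc]

theorem nn_elt (a : Int) : decide (0 ≤ a) = !decide (a < 0) := by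
  rw [← decide_not]; simp


theorem np_elt (a : Int) : decide (a ≤ 0) = !decide (0 < a) := by
  rw [← decide_not]; simp


theorem all_nonneg_eq (l : List Int) :
    l.all (fun v => decide (0 ≤ v)) = !l.any (fun v => decide (v < 0)) := by
  induction l with
  | nil => rfl
  | cons a t ih => rw [List.all_cons, ih, List.any_cons, Bool.not_or, nn_elt]

theorem all_nonpos_eq (l : List Int) :
    l.all (fun v => decide (v ≤ 0)) = !l.any (fun v => decide (0 < v)) := by
  induction l with
  | nil => rfl
  | cons a t ih => rw [List.all_cons, ih, List.any_cons, Bool.not_or, np_elt]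

theorem cons_nonneg_eq (v0 : Int) (rest : List Int) :
    (v0 :: rest).all (fun v => decide (0 ≤ v)) =
      !(decide (v0 < 0) || rest.any (fun v => decide (v < 0))) := by
  rw [List.all_cons, all_nonneg_eq, nn_elt, Bool.not_or]

theorem cons_nonpos_eq (v0 : Int) (rest : List Int) :
    (v0 :: rest).all (fun v => decide (v ≤ 0)) =
      !(decide (0 < v0) || rest.any (fun v => decide (0 < v))) := by
  rw [List.all_cons, all_nonpos_eq, np_elt, Bool.not_or]

-- Nat-level: the index scan over range(n-1) equals the chained pair check
theorem natAlt (v0 : Int) (rest : List Int) :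
    (List.range ((v0 :: rest).length - 1)).all
      (fun k => ((v0 :: rest).getD k 0 == 0) || ((v0 :: rest).getD (k + 1) 0 == 0) ||
                (decide (0 < (v0 :: rest).getD k 0) != decide (0 < (v0 :: rest).getD (k + 1) 0))) =
    pvAltChain v0 rest := by
  induction rest generalizing v0 with
  | nil => rfl
  | cons b t ih =>
      have h : (v0 :: b :: t).length - 1 = ((b :: t).length - 1) + 1 := by simp
      rw [h, List.range_succ_eq_map]
      simp only [List.all_cons, List.all_map, pvAltChain]
      rw [← ih b]
      rfl

-- A's pyRange/pyGetD scan reduced to the Nat-level scan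
theorem pyAlt_eq (values : List Int) :
    (PySem.List.pyRange 0 ((values.length : Int) - 1) 1).all
      (fun i => (PySem.List.pyGetD values i 0 == 0) ||
                (PySem.List.pyGetD values (i + 1) 0 == 0) ||
                (decide (0 < PySem.List.pyGetD values i 0) != decide (0 < PySem.List.pyGetD values (i + 1) 0))) =
    (List.range (values.length - 1)).all
      (fun k => (values.getD k 0 == 0) || (values.getD (k + 1) 0 == 0) ||
                (decide (0 < values.getD k 0) != decide (0 < values.getD (k + 1) 0))) := by
  rw [PySem.List.pyRange_one]
  have hn : ((values.length : Int) - 1 - 0).toNat = values.length - 1 := by omega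
  rw [hn, List.all_map]
  congr 1
  funext k
  have e1 : (0 : Int) + (k : Int) = ((k : Nat) : Int) := by omega
  have e2 : (k : Int) + 1 = (((k + 1 : Nat)) : Int) := by omega
  simp only [Function.comp_apply, e1, e2, PySem.List.pyGetD_natCast]

-- ===== VERDICT (by name: the statement is the Claim_ definition above) =====
theorem sign_pattern_py_spec : Claim_equal_sign_pattern_py := by
  intro values _
  show sign_pattern_py values = sign_pattern_py_alt values
  match values with
  | [] => rfl
  | v0 :: rest =>
    simp only [sign_pattern_py, sign_pattern_py_alt, if_neg (List.cons_ne_nil v0 rest)]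
    rw [foldB_inv, pyAlt_eq, natAlt]
    rw [cons_nonneg_eq, cons_nonpos_eq]
    simp only [Bool.true_and]
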